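-- pv_equiv track=rewrite | github.com/RaZakeeM/Python_Projects_Portfolio | AirbnbDataProject.py | nums_listings
-- ===== SOURCE A (Python) =====
-- def nums_listings(dict):
--     '''
--     This function takes a dictionary of host keys and room(s) list
--     values and finds the length of the value list. it constructs a
--     new dictionary where the number of listings are the keys and the
--     value gets iteratively added to as the function looks through
--     the entered dictionary. Then it constructs a list of zeros (length as
--     large as the largest key in the new dictionary) and replaces those zeros
--     with the number of hosts owning the number of (index) properties from the dictionary.
--     it returns the final list after all changes are made.
--     :param dict: Type: dictionary this is a dictionary of host id keys and list
--     values of the rooms each host owns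
--     :return: Type: list this is a list that provides the number of hosts per index
--     (treated as the number of properties owned)
--     '''
--     # This is the initial value for the new dictionary of property number and number of owners
--     d={}
--     # This is a for loop that looks through the keys of the provided dictionary
--     # creates keys that are ints of the lengths of the original dictionary's list values
--     # and the values to these keys are iteratively added to as opposed to multiple keys of the same value 1
--     for key in dict.keys():
--         # These are the conditional statements the len(key)
--         # must satisfy before being operated on in the dictionary
--         if int(len(dict[key])) not in d.keys():
--             d[int(len(dict[key]))] = 1
--         else:
--             d[int(len(dict[key]))] = d[int(len(dict[key]))]+1
--     # These 3 lines of code make the keys a list and sort them as they are ints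
--     # It also constructs a final list that will later be returned
--     unsorted_list_of_keys = list(d.keys())
--     unsorted_list_of_keys.sort()
--     final_list = []
--     # This for loop constructs a list of zeros that amount to
--     # the largest key from the new dictionary plus 1
--     for i in range(unsorted_list_of_keys[-1]+1):
--         final_list.append(0)
--     # This for loop iterates through the indices in the final list
--     # if the index is in the keys of the new dictionary then replace
--     # the index's element with the value of the key in dictionary d
--     for entry in range(len(final_list)):
--         if entry in d.keys():
--             final_list[entry] = d[entry]
--
--     return final_list
-- ===== SOURCE B (Python) =====
-- def nums_listings(dict):
--     # Sort the listing-counts, then run-length scan the sorted list to emit the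
--     # histogram front-to-back (no counter dict, no random-access increments).
--     counts = sorted(len(v) for v in dict.values())
--     last = counts[-1]  # IndexError on empty dict, like A
--     out = []
--     i = 0
--     n = len(counts)
--     for v in range(last + 1):
--         run = 0
--         while i < n and counts[i] == v:
--             run += 1
--             i += 1
--         out.append(run)
--     return out
-- ===== Notes on version B (the rewrite author's own statement) =====
-- stated objective: alternative
-- what changed: B replaces A's counter-dict + sorted-keys + zero-fill/copy-loop pipeline by sort-then-scan: it sorts the listing counts once and emits the histogram front-to-back by a run-length scan of the sorted list (two cursors, no dictionary, no random-access writes).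
-- outside the precondition, e.g. on nums_listings({}): A raises IndexError, B raises IndexError
import Mathlib
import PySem

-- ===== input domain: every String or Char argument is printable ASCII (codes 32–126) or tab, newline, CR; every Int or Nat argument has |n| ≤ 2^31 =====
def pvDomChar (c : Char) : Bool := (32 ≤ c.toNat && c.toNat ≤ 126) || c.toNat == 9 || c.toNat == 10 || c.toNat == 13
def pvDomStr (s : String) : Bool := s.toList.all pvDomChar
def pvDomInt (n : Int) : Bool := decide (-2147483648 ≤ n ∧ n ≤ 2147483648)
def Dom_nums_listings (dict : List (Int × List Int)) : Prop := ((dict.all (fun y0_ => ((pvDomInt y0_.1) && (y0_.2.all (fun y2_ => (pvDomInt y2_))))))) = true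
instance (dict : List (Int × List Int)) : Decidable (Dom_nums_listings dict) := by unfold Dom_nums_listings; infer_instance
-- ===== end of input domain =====

-- B sorts the listing-counts once and emits the histogram front-to-back by a run-length scan
-- of the sorted list, instead of A's counter dict + sorted-key scan + zero-fill/copy loops
-- (objective: alternative).

-- ===== PORT A =====
def nums_listings (dict : List (Int × List Int)) : List Int :=
  let dd : PySem.Dict Int (List Int) := PySem.Dict.mk dict
  -- d = {}; for key in dict.keys(): if len(dict[key]) not in d.keys(): d[..]=1 else d[..]+=1
  let d : PySem.Dict Int Int :=
    (PySem.Dict.keys dd).foldl (fun d key =>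
      if (PySem.Dict.contains d ((PySem.Dict.getD dd key []).length : Int)) = false then
        PySem.Dict.insert d ((PySem.Dict.getD dd key []).length : Int) 1
      else
        PySem.Dict.insert d ((PySem.Dict.getD dd key []).length : Int)
          (PySem.Dict.getD d ((PySem.Dict.getD dd key []).length : Int) 0 + 1))
      PySem.Dict.empty
  -- unsorted_list_of_keys = list(d.keys()); unsorted_list_of_keys.sort()
  let sortedKeys := PySem.List.sorted (PySem.Dict.keys d) id
  -- unsorted_list_of_keys[-1]  (IndexError on empty dict: excluded by Pre_)
  match PySem.List.pyGet? sortedKeys (-1) with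
  | none => []
  | some m =>
    -- final_list = []; for i in range(last+1): final_list.append(0)
    let final0 : List Int := (PySem.List.pyRange 0 (m + 1) 1).foldl (fun acc _ => acc ++ [0]) []
    -- for entry in range(len(final_list)): if entry in d.keys(): final_list[entry] = d[entry]
    -- (the assignment hits a nonnegative in-range index, so List.set entry.toNat is exact;
    --  entry in d.keys() guarantees d[entry] exists, so getD is exact)
    (PySem.List.pyRange 0 (final0.length : Int) 1).foldl
      (fun fl entry =>
        if PySem.Dict.contains d entry then
          fl.set entry.toNat (PySem.Dict.getD d entry 0)
        else fl) final0

-- ===== PORT B =====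
-- the inner 'while i < n and counts[i] == v: run += 1; i += 1' loop, ported as structural
-- recursion on the remaining suffix of counts (index i ↔ the suffix counts[i:])
def pvRunLen (cs : List Int) (v : Int) : Nat × List Int :=
  match cs with
  | [] => (0, [])
  | c :: rest =>
    if c = v then
      let p := pvRunLen rest v
      (p.1 + 1, p.2)
    else (0, c :: rest)

def nums_listings_alt (dict : List (Int × List Int)) : List Int :=
  -- counts = sorted(len(v) for v in dict.values())
  let counts : List Int :=
    PySem.List.sorted ((PySem.Dict.values (PySem.Dict.mk dict)).map (fun v => (v.length : Int))) id
  -- last = counts[-1]  (IndexError on empty dict: excluded by Pre_)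
  match PySem.List.pyGet? counts (-1) with
  | none => []
  | some last =>
    -- out = []; i = 0; for v in range(last+1): run-length scan, out.append(run)
    ((PySem.List.pyRange 0 (last + 1) 1).foldl
      (fun (st : List Int × List Int) v =>
        let p := pvRunLen st.2 v
        (st.1 ++ [(p.1 : Int)], p.2)) ([], counts)).1

-- ===== PRECONDITION & SPEC =====
-- Pre_ excludes the empty dict, on which both A and B raise IndexError, and association
-- lists with duplicate keys, which do not encode any Python dict (a dict's keys are unique).
def Pre_nums_listings (dict : List (Int × List Int)) : Prop :=
  dict ≠ [] ∧ (dict.map (·.1)).Nodup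
instance (dict : List (Int × List Int)) : Decidable (Pre_nums_listings dict) := by
  unfold Pre_nums_listings; infer_instance
def pvWitness_nums_listings : (List (Int × List Int)) := [(1, [10, 20]), (2, [30]), (3, [40, 50])]
def Spec_nums_listings (dict : List (Int × List Int)) (out : List Int) : Prop := out = nums_listings_alt dict
instance (dict : List (Int × List Int)) (out : List Int) : Decidable (Spec_nums_listings dict out) := by unfold Spec_nums_listings; infer_instance

-- ===== CLAIM (what is proved, stated in full; the proofs are below) =====
def Claim_equal_nums_listings : Prop := ∀ (dict : List (Int × List Int)), Dom_nums_listings dict → Pre_nums_listings dict → Spec_nums_listings dict (nums_listings dict)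

-- ===== LEMMAS AND PROOFS =====

-- the listing-count multiset both programs histogram
def pvCnts (dict : List (Int × List Int)) : List Int := dict.map (fun p => ((p.2).length : Int))

theorem pvCnts_nonneg (dict : List (Int × List Int)) : ∀ c ∈ pvCnts dict, 0 ≤ c := by
  intro c hc
  simp only [pvCnts, List.mem_map] at hc
  obtain ⟨p, _, rfl⟩ := hc
  positivity

-- sorted(xs)[-1] is a maximum of xs
theorem pvSortedLast_max (xs : List Int) (m : Int)
    (h : PySem.List.pyGet? (PySem.List.sorted xs id) (-1) = some m) :
    m ∈ xs ∧ ∀ y ∈ xs, y ≤ m := by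
  rw [PySem.List.pyGet?_neg_one] at h
  have hperm := PySem.List.sorted_perm xs id false
  have hpw := PySem.List.sorted_pairwise xs id
  rw [List.getLast?_eq_some_iff] at h
  obtain ⟨l', hl⟩ := h
  constructor
  · exact hperm.mem_iff.1 (hl ▸ List.mem_append.2 (Or.inr (List.mem_singleton_self m)))
  · intro y hy
    have hy' : y ∈ l' ++ [m] := hl ▸ hperm.symm.subset hy
    rcases List.mem_append.1 hy' with h1 | h1
    · rw [hl] at hpw
      exact (List.pairwise_append.1 hpw).2.2 y h1 m (List.mem_singleton_self m)
    · simp_all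

theorem pvSortedLast_isSome (xs : List Int) (hne : xs ≠ []) :
    ∃ m, PySem.List.pyGet? (PySem.List.sorted xs id) (-1) = some m := by
  rw [PySem.List.pyGet?_neg_one]
  have hperm := PySem.List.sorted_perm xs id false
  have h : PySem.List.sorted xs id ≠ [] := by
    intro h0
    exact hne (List.Perm.eq_nil (h0 ▸ hperm.symm))
  exact ⟨_, List.getLast?_eq_some_getLast h⟩

-- A's counting loop builds Counter(pvCnts dict) when the keys are unique
theorem pvA_counter (dict : List (Int × List Int)) (hnd : (dict.map (·.1)).Nodup) :
    (PySem.Dict.keys (PySem.Dict.mk dict)).foldl (fun d key =>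
      if (PySem.Dict.contains d ((PySem.Dict.getD (PySem.Dict.mk dict) key []).length : Int)) = false then
        PySem.Dict.insert d ((PySem.Dict.getD (PySem.Dict.mk dict) key []).length : Int) 1
      else
        PySem.Dict.insert d ((PySem.Dict.getD (PySem.Dict.mk dict) key []).length : Int)
          (PySem.Dict.getD d ((PySem.Dict.getD (PySem.Dict.mk dict) key []).length : Int) 0 + 1))
      PySem.Dict.empty
    = PySem.Dict.counter (pvCnts dict) := by
  have hbody : ∀ (d : PySem.Dict Int Int) (key : Int),
      (if (PySem.Dict.contains d ((PySem.Dict.getD (PySem.Dict.mk dict) key []).length : Int)) = false then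
        PySem.Dict.insert d ((PySem.Dict.getD (PySem.Dict.mk dict) key []).length : Int) 1
      else
        PySem.Dict.insert d ((PySem.Dict.getD (PySem.Dict.mk dict) key []).length : Int)
          (PySem.Dict.getD d ((PySem.Dict.getD (PySem.Dict.mk dict) key []).length : Int) 0 + 1))
      = PySem.Dict.insert d ((PySem.Dict.getD (PySem.Dict.mk dict) key []).length : Int)
          (PySem.Dict.getD d ((PySem.Dict.getD (PySem.Dict.mk dict) key []).length : Int) 0 + 1) := by
    intro d key
    by_cases h : PySem.Dict.contains d ((PySem.Dict.getD (PySem.Dict.mk dict) key []).length : Int) = false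
    · rw [if_pos h, PySem.Dict.getD_of_not_contains _ _ h]; norm_num
    · rw [if_neg h]
  simp only [hbody]
  have hmap : (PySem.Dict.keys (PySem.Dict.mk dict)).map
      (fun key => ((PySem.Dict.getD (PySem.Dict.mk dict) key []).length : Int))
      = dict.map (fun p => ((p.2).length : Int)) := by
    have hk : (PySem.Dict.keys (PySem.Dict.mk dict)).Nodup := by
      simpa [PySem.Dict.keys_mk] using hnd
    have hv := PySem.Dict.values_eq_map_keys (PySem.Dict.mk dict) hk []
    have h2 : (PySem.Dict.values (PySem.Dict.mk dict)).map (fun v => ((v.length : Int))) =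
        (PySem.Dict.keys (PySem.Dict.mk dict)).map
          (fun key => ((PySem.Dict.getD (PySem.Dict.mk dict) key []).length : Int)) := by
      rw [hv, List.map_map]; rfl
    rw [← h2]
    simp [PySem.Dict.values_mk, List.map_map]
  simp only [pvCnts]
  rw [← PySem.Dict.foldl_insert_getD_add_one_eq_counter, ← hmap, List.foldl_map]

-- B's inner while loop on a sorted suffix whose elements are all ≥ v:
-- the run length is the total count of v, and the rest keeps the invariant at v+1
theorem pvRunLen_spec : ∀ (cs : List Int) (v : Int), cs.Pairwise (· ≤ ·) → (∀ c ∈ cs, v ≤ c) →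
    (pvRunLen cs v).1 = cs.count v ∧ (pvRunLen cs v).2.Pairwise (· ≤ ·) ∧
    (∀ c ∈ (pvRunLen cs v).2, v + 1 ≤ c) ∧
    (∀ w : Int, v + 1 ≤ w → (pvRunLen cs v).2.count w = cs.count w) := by
  intro cs
  induction cs with
  | nil => intro v _ _; simp [pvRunLen]
  | cons c rest ih =>
    intro v hp hge
    obtain ⟨hhead, hprest⟩ := List.pairwise_cons.1 hp
    by_cases hc : c = v
    · subst hc
      obtain ⟨ih1, ih2, ih3, ih4⟩ := ih c hprest (fun x hx => hhead x hx)
      have hdef : pvRunLen (c :: rest) c = ((pvRunLen rest c).1 + 1, (pvRunLen rest c).2) := by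
        simp [pvRunLen]
      rw [hdef]
      refine ⟨?_, ih2, ih3, ?_⟩
      · simp [ih1, List.count_cons_self]
      · intro w hw
        have hne : ¬ ((c : Int) = w) := by omega
        rw [ih4 w hw, List.count_cons]
        simp [hne]
    · have hc1 : v + 1 ≤ c := by have := hge c (by simp); omega
      have hdef : pvRunLen (c :: rest) v = (0, c :: rest) := by
        simp [pvRunLen, hc]
      rw [hdef]
      refine ⟨?_, hp, ?_, fun w _ => rfl⟩
      · have hnot : v ∉ c :: rest := by
          intro hmem
          rcases List.mem_cons.1 hmem with h | h
          · omega
          · have := hhead v h; omega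
        simp [List.count_eq_zero.2 hnot]
      · intro x hx
        rcases List.mem_cons.1 hx with h | h
        · omega
        · have := hhead x h; omega

-- the histogram of values 0..k-1 in cs
def pvHist (cs : List Int) (k : Nat) : List Int :=
  (List.range k).map (fun i : Nat => ((cs.count ((i : Nat) : Int) : Nat) : Int))

-- B's outer for loop: after k iterations the output is the histogram of 0..k-1
-- and the remaining suffix carries the invariant at k
theorem pvFoldRun (cs : List Int) (hp : cs.Pairwise (· ≤ ·)) (h0 : ∀ c ∈ cs, (0:Int) ≤ c) :
    ∀ k : Nat,
    ((PySem.List.pyRange 0 (k:Int) 1).foldl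
      (fun (st : List Int × List Int) v =>
        let p := pvRunLen st.2 v
        (st.1 ++ [(p.1 : Int)], p.2)) ([], cs)).1
      = pvHist cs k ∧
    (((PySem.List.pyRange 0 (k:Int) 1).foldl
      (fun (st : List Int × List Int) v =>
        let p := pvRunLen st.2 v
        (st.1 ++ [(p.1 : Int)], p.2)) ([], cs)).2.Pairwise (· ≤ ·) ∧
     (∀ c ∈ ((PySem.List.pyRange 0 (k:Int) 1).foldl
      (fun (st : List Int × List Int) v =>
        let p := pvRunLen st.2 v
        (st.1 ++ [(p.1 : Int)], p.2)) ([], cs)).2, (k:Int) ≤ c) ∧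
     (∀ w : Int, (k:Int) ≤ w →
      (((PySem.List.pyRange 0 (k:Int) 1).foldl
      (fun (st : List Int × List Int) v =>
        let p := pvRunLen st.2 v
        (st.1 ++ [(p.1 : Int)], p.2)) ([], cs)).2.count w = cs.count w))) := by
  intro k
  induction k with
  | zero =>
    rw [PySem.List.pyRange_one_eq_nil (by norm_num)]
    exact ⟨by simp [pvHist], hp, h0, fun w _ => rfl⟩
  | succ k ih =>
    obtain ⟨ih1, ihp, ihge, ihcnt⟩ := ih
    have hsplit : PySem.List.pyRange 0 ((k + 1 : Nat) : Int) 1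
        = PySem.List.pyRange 0 (k : Int) 1 ++ [(k : Int)] := by
      have h2 := PySem.List.pyRange_one_succ_right (a := 0) (b := (k : Int)) (Int.natCast_nonneg k)
      push_cast
      rw [h2]
    rw [hsplit, List.foldl_append]
    set st := (PySem.List.pyRange 0 (k:Int) 1).foldl
      (fun (st : List Int × List Int) v =>
        let p := pvRunLen st.2 v
        (st.1 ++ [(p.1 : Int)], p.2)) ([], cs) with hst
    obtain ⟨r1, r2, r3, r4⟩ := pvRunLen_spec st.2 (k:Int) ihp ihge
    simp only [List.foldl_cons, List.foldl_nil]
    refine ⟨?_, r2, fun c hc => by have := r3 c hc; push_cast; omega, fun w hw => ?_⟩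
    · rw [ih1]
      simp only [pvHist, List.range_succ, List.map_append, List.map_cons, List.map_nil]
      simp [r1, ihcnt (k:Int) le_rfl]
    · rw [r4 w (by push_cast at hw ⊢; omega), ihcnt w (by push_cast at hw ⊢; omega)]

-- A's copy loop, pointwise
theorem pvCopy (d : PySem.Dict Int Int) (fl : List Int) : ∀ (k : Nat), k ≤ fl.length →
    ((PySem.List.pyRange 0 (k : Int) 1).foldl (fun fl entry =>
        if PySem.Dict.contains d entry then fl.set entry.toNat (PySem.Dict.getD d entry 0)
        else fl) fl).length = fl.length ∧
    ∀ i (hi : i < fl.length),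
      ((PySem.List.pyRange 0 (k : Int) 1).foldl (fun fl entry =>
        if PySem.Dict.contains d entry then fl.set entry.toNat (PySem.Dict.getD d entry 0)
        else fl) fl)[i]? =
        some (if i < k ∧ PySem.Dict.contains d (i : Int) then PySem.Dict.getD d (i : Int) 0 else fl[i]) := by
  intro k
  induction k with
  | zero =>
    intro _
    rw [PySem.List.pyRange_one_eq_nil (by norm_num)]
    refine ⟨rfl, fun i hi => ?_⟩
    simp [List.getElem?_eq_getElem hi]
  | succ k ih =>
    intro hk
    obtain ⟨ihl, ihe⟩ := ih (by omega)
    have hsplit : PySem.List.pyRange 0 ((k + 1 : Nat) : Int) 1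
        = PySem.List.pyRange 0 (k : Int) 1 ++ [(k : Int)] := by
      have h2 := PySem.List.pyRange_one_succ_right (a := 0) (b := (k : Int)) (Int.natCast_nonneg k)
      push_cast
      rw [h2]
    rw [hsplit, List.foldl_append]
    set res := (PySem.List.pyRange 0 (k : Int) 1).foldl (fun fl entry =>
        if PySem.Dict.contains d entry then fl.set entry.toNat (PySem.Dict.getD d entry 0)
        else fl) fl with hres
    simp only [List.foldl_cons, List.foldl_nil]
    have hend : ∀ (i : Nat) (hi : i < fl.length), i ≠ k →
        (if i < k ∧ PySem.Dict.contains d (i : Int) then PySem.Dict.getD d (i : Int) 0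
          else fl[i]'hi) =
        (if i < k + 1 ∧ PySem.Dict.contains d (i : Int) then PySem.Dict.getD d (i : Int) 0
          else fl[i]'hi) := by
      intro i hi hik
      by_cases hcc : PySem.Dict.contains d (i : Int)
      · by_cases hik' : i < k
        · rw [if_pos ⟨hik', hcc⟩, if_pos ⟨by omega, hcc⟩]
        · rw [if_neg (by tauto), if_neg (by simp only [not_and]; intro h; omega)]
      · rw [if_neg (by tauto), if_neg (by tauto)]
    by_cases hc : PySem.Dict.contains d (k : Int)
    · rw [if_pos hc]
      have hkt : (k : Int).toNat = k := by omega
      refine ⟨by simp [ihl], fun i hi => ?_⟩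
      rw [List.getElem?_set, hkt]
      by_cases hik : k = i
      · subst hik
        rw [if_pos rfl, ihl, if_pos hi]
        congr 1
        rw [if_pos ⟨by omega, hc⟩]
      · rw [if_neg hik, ihe i hi]
        congr 1
        exact hend i hi (fun h => hik h.symm)
    · rw [if_neg hc]
      refine ⟨ihl, fun i hi => ?_⟩
      rw [ihe i hi]
      congr 1
      by_cases hik : i = k
      · subst hik
        rw [if_neg (by tauto), if_neg (by tauto)]
      · exact hend i hi hik

-- ===== VERDICT (by name: the statement is the Claim_ definition above) =====
theorem nums_listings_spec : Claim_equal_nums_listings := by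
  intro dict _ hpre
  obtain ⟨hne, hnd⟩ := hpre
  unfold Spec_nums_listings
  have hcnts_ne : pvCnts dict ≠ [] := by simp [pvCnts, hne]
  have hset_ne : (PySem.Set.ofList (pvCnts dict) : List Int) ≠ [] := by
    obtain ⟨c, hc⟩ := List.exists_mem_of_ne_nil _ hcnts_ne
    exact List.ne_nil_of_mem ((PySem.Set.mem_ofList _ _).2 hc)
  obtain ⟨mA, hmA⟩ := pvSortedLast_isSome _ hset_ne
  obtain ⟨mB, hmB⟩ := pvSortedLast_isSome _ hcnts_ne
  obtain ⟨hmAmem, hmAmax⟩ := pvSortedLast_max _ _ hmA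
  obtain ⟨hmBmem, hmBmax⟩ := pvSortedLast_max _ _ hmB
  have hmAB : mA = mB := by
    apply le_antisymm
    · exact hmBmax mA ((PySem.Set.mem_ofList _ _).1 hmAmem)
    · exact hmAmax mB ((PySem.Set.mem_ofList _ _).2 hmBmem)
  have hm0 : 0 ≤ mB := pvCnts_nonneg dict mB hmBmem
  simp only [nums_listings, nums_listings_alt]
  rw [pvA_counter dict hnd, PySem.Dict.keys_counter, hmA]
  have hBc : (PySem.Dict.values (PySem.Dict.mk dict)).map (fun v => ((v.length : Int))) = pvCnts dict := by
    simp [pvCnts, PySem.Dict.values_mk, List.map_map]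
  rw [hBc, hmB]
  simp only []
  subst hmAB
  have hfin : (PySem.List.pyRange 0 (mA + 1) 1).foldl (fun acc _ => acc ++ [(0:Int)]) []
      = List.replicate (mA + 1).toNat 0 := by
    rw [PySem.List.foldl_append_singleton_eq_map (fun _ => (0:Int))]
    simp [List.map_const', PySem.List.length_pyRange_one]
  rw [hfin]
  set n := (mA + 1).toNat with hn
  have hlenrep : (List.replicate n (0:Int)).length = n := List.length_replicate
  have hcast : ((n : Int)) = mA + 1 := by omega
  have hAres := pvCopy (PySem.Dict.counter (pvCnts dict)) (List.replicate n 0) n (by rw [hlenrep])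
  -- B side: sort then run-length scan
  set cs := PySem.List.sorted (pvCnts dict) id with hcs
  have hcsp : cs.Pairwise (· ≤ ·) := by
    have := PySem.List.sorted_pairwise (pvCnts dict) id
    simpa [hcs, id] using this
  have hcs0 : ∀ c ∈ cs, (0:Int) ≤ c := by
    intro c hc
    exact pvCnts_nonneg dict c ((PySem.List.mem_sorted (pvCnts dict) id false c).1 hc)
  have hcount : ∀ w : Int, cs.count w = (pvCnts dict).count w := by
    intro w
    exact (PySem.List.sorted_perm (pvCnts dict) id false).count_eq w
  have hBres := (pvFoldRun cs hcsp hcs0 n).1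
  rw [hcast] at hBres
  rw [hBres, hlenrep]
  simp only [List.length_replicate] at hAres
  obtain ⟨hAlen, hAe⟩ := hAres
  apply List.ext_getElem?
  intro i
  by_cases hi : i < n
  · rw [hAe i hi]
    simp only [pvHist]
    rw [List.getElem?_map, List.getElem?_range hi]
    simp only [Option.map_some]
    congr 1
    rw [List.getElem_replicate, hcount (i:Int)]
    by_cases hmem : (i : Int) ∈ pvCnts dict
    · rw [if_pos ⟨hi, by rw [PySem.Dict.contains_counter]; exact List.contains_iff_mem.2 hmem⟩,
        PySem.Dict.getD_counter]
    · rw [if_neg (by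
        rw [PySem.Dict.contains_counter]
        intro hcon
        exact hmem (List.contains_iff_mem.1 hcon.2)),
        List.count_eq_zero.2 hmem]
      rfl
  · rw [List.getElem?_eq_none (by rw [hAlen]; omega),
      List.getElem?_eq_none (by simp only [pvHist, List.length_map, List.length_range]; omega)]
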